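-- pv_equiv track=rewrite | github.com/ismip/ismip7-antarctic-ocean-forcing | i7aof/imbie/extend.py | _rasterize_line_supercover
-- ===== SOURCE A (Python) =====
-- def _rasterize_line(
--     start: tuple[int, int],
--     goal: tuple[int, int],
-- ) -> list[tuple[int, int]]:
--     """Rasterize a straight line between two integer grid points (Bresenham).
--
--     Returns a list of (y, x) integer coordinates approximating a straight line.
--     """
--     y0, x0 = int(start[0]), int(start[1])
--     y1, x1 = int(goal[0]), int(goal[1])
--     points: list[tuple[int, int]] = []
--     dy = abs(y1 - y0)
--     dx = abs(x1 - x0)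
--     sy = 1 if y0 < y1 else -1
--     sx = 1 if x0 < x1 else -1
--     if dx > dy:
--         err = dx // 2
--         while x0 != x1:
--             points.append((y0, x0))
--             err -= dy
--             if err < 0:
--                 y0 += sy
--                 err += dx
--             x0 += sx
--     else:
--         err = dy // 2
--         while y0 != y1:
--             points.append((y0, x0))
--             err -= dx
--             if err < 0:
--                 x0 += sx
--                 err += dy
--             y0 += sy
--     points.append((y1, x1))
--     return points
--
-- def _rasterize_line_supercover(
--     start: tuple[int, int],
--     goal: tuple[int, int],
-- ) -> list[tuple[int, int]]:
--     """Rasterize a line and include corner cells on diagonal steps.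
--
--     Bresenham produces an 8-connected path. For boundary walls we typically
--     need to avoid diagonal corner gaps, so for each diagonal step we include
--     the two orthogonal corner cells as well (a 2x2 "supercover" at corners).
--     """
--
--     path = _rasterize_line(start, goal)
--     if len(path) <= 1:
--         return path
--
--     out: list[tuple[int, int]] = [path[0]]
--     for (y0, x0), (y1, x1) in zip(path[:-1], path[1:], strict=True):
--         dy = y1 - y0
--         dx = x1 - x0
--         if dy != 0 and dx != 0:
--             # Diagonal step: add both orthogonal corner cells to avoid a
--             # corner gap that an 8-neighbor fill could slip through.
--             out.append((y0, x1))
--             out.append((y1, x0))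
--         out.append((y1, x1))
--
--     # Preserve order but drop duplicates
--     seen: set[tuple[int, int]] = set()
--     deduped: list[tuple[int, int]] = []
--     for pt in out:
--         if pt in seen:
--             continue
--         seen.add(pt)
--         deduped.append(pt)
--     return deduped
-- ===== SOURCE B (Python) =====
-- def _rasterize_line_supercover(
--     start: tuple[int, int],
--     goal: tuple[int, int],
-- ) -> list[tuple[int, int]]:
--     """Single fused Bresenham pass: emit supercover corners while stepping,
--     without building the intermediate path list, then order-preserving dedup."""
--     y0, x0 = int(start[0]), int(start[1])
--     y1, x1 = int(goal[0]), int(goal[1])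
--     dy = abs(y1 - y0)
--     dx = abs(x1 - x0)
--     sy = 1 if y0 < y1 else -1
--     sx = 1 if x0 < x1 else -1
--     out: list[tuple[int, int]] = [(y0, x0)]
--     if dx > dy:
--         err = dx // 2
--         while x0 != x1:
--             py, px = y0, x0
--             err -= dy
--             if err < 0:
--                 y0 += sy
--                 err += dx
--             x0 += sx
--             ny, nx = (y1, x1) if x0 == x1 else (y0, x0)
--             if ny != py and nx != px:
--                 out.append((py, nx))
--                 out.append((ny, px))
--             out.append((ny, nx))
--     else:
--         err = dy // 2
--         while y0 != y1:
--             py, px = y0, x0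
--             err -= dx
--             if err < 0:
--                 x0 += sx
--                 err += dy
--             y0 += sy
--             ny, nx = (y1, x1) if y0 == y1 else (y0, x0)
--             if ny != py and nx != px:
--                 out.append((py, nx))
--                 out.append((ny, px))
--             out.append((ny, nx))
--     seen: set[tuple[int, int]] = set()
--     deduped: list[tuple[int, int]] = []
--     for pt in out:
--         if pt in seen:
--             continue
--         seen.add(pt)
--         deduped.append(pt)
--     return deduped
-- ===== Notes on version B (the rewrite author's own statement) =====
-- stated objective: alternative
-- what changed: B fuses A's three passes (build the full Bresenham path, then a separate zip pass over consecutive path points inserting corner cells, then dedup) into a single Bresenham stepping loop that emits the corner cells inline while stepping, keeping only the previous point instead of the intermediate path list; the order-preserving dedup stays.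
import Mathlib
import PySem

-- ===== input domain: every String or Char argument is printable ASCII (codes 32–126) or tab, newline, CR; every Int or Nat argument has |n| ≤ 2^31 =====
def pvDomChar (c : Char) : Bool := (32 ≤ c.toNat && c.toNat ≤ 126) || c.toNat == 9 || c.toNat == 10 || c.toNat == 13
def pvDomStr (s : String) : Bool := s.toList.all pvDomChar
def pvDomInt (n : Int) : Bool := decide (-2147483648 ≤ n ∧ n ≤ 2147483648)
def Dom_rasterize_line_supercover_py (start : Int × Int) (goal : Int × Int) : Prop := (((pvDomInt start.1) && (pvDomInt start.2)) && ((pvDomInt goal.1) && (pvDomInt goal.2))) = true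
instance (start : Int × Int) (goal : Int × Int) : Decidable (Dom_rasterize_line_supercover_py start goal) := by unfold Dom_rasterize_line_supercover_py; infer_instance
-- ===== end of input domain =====

-- B fuses A's three passes (Bresenham path, pairwise corner insertion, dedup) into a single
-- Bresenham stepping loop that emits corner cells inline, followed by the same dedup (alternative).

-- ===== PORT A =====
-- the while-loop of _rasterize_line, x-driving branch; fuel = |x1 - x0| counts the iterations
def pvBresX : Nat → Int → Int → Int → Int → Int → Int → Int → Int → Int → List (Int × Int)
  | 0, _, _, _, _, _, _, _, _, _ => []
  | fuel + 1, y0, x0, y1, x1, sy, sx, dy, dx, err =>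
    if x0 ≠ x1 then
      (y0, x0) ::
        (let err2 := err - dy
         if err2 < 0 then pvBresX fuel (y0 + sy) (x0 + sx) y1 x1 sy sx dy dx (err2 + dx)
         else pvBresX fuel y0 (x0 + sx) y1 x1 sy sx dy dx err2)
    else []

-- the while-loop of _rasterize_line, y-driving branch; fuel = |y1 - y0|
def pvBresY : Nat → Int → Int → Int → Int → Int → Int → Int → Int → Int → List (Int × Int)
  | 0, _, _, _, _, _, _, _, _, _ => []
  | fuel + 1, y0, x0, y1, x1, sy, sx, dy, dx, err =>
    if y0 ≠ y1 then
      (y0, x0) ::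
        (let err2 := err - dx
         if err2 < 0 then pvBresY fuel (y0 + sy) (x0 + sx) y1 x1 sy sx dy dx (err2 + dy)
         else pvBresY fuel (y0 + sy) x0 y1 x1 sy sx dy dx err2)
    else []

def pvRasterizeLine (start : Int × Int) (goal : Int × Int) : List (Int × Int) :=
  let y0 := start.1; let x0 := start.2
  let y1 := goal.1; let x1 := goal.2
  let dy := |y1 - y0|
  let dx := |x1 - x0|
  let sy : Int := if y0 < y1 then 1 else -1
  let sx : Int := if x0 < x1 then 1 else -1
  (if dx > dy then
    pvBresX (x1 - x0).natAbs y0 x0 y1 x1 sy sx dy dx (PySem.Int.floordiv dx 2)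
  else
    pvBresY (y1 - y0).natAbs y0 x0 y1 x1 sy sx dy dx (PySem.Int.floordiv dy 2)) ++ [(y1, x1)]

-- the per-pair body of A's zip loop over consecutive path points
def pvEmit (p q : Int × Int) : List (Int × Int) :=
  if q.1 - p.1 ≠ 0 ∧ q.2 - p.2 ≠ 0 then [(p.1, q.2), (q.1, p.2), q] else [q]

-- A's zip(path[:-1], path[1:]) loop (everything appended after out = [path[0]])
def pvSuperPairs : List (Int × Int) → List (Int × Int)
  | p :: q :: rest => pvEmit p q ++ pvSuperPairs (q :: rest)
  | _ => []

-- the order-preserving set dedup loop (identical code in A and in B)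
def pvDedup (seen : PySem.Set (Int × Int)) (ded : List (Int × Int)) : List (Int × Int) → List (Int × Int)
  | [] => ded
  | pt :: rest =>
    if PySem.Set.contains seen pt then pvDedup seen ded rest
    else pvDedup (PySem.Set.add seen pt) (ded ++ [pt]) rest

def rasterize_line_supercover_py (start : Int × Int) (goal : Int × Int) : List (Int × Int) :=
  let path := pvRasterizeLine start goal
  if path.length ≤ 1 then path
  else pvDedup PySem.Set.empty [] (path.headD (0, 0) :: pvSuperPairs path)

-- ===== PORT B =====
-- B's fused x-driving loop: step Bresenham and emit corners inline
def pvFusedX : Nat → Int → Int → Int → Int → Int → Int → Int → Int → Int → List (Int × Int)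
  | 0, _, _, _, _, _, _, _, _, _ => []
  | fuel + 1, y0, x0, y1, x1, sy, sx, dy, dx, err =>
    if x0 ≠ x1 then
      let err2 := err - dy
      let y0' := if err2 < 0 then y0 + sy else y0
      let err' := if err2 < 0 then err2 + dx else err2
      let x0' := x0 + sx
      let n : Int × Int := if x0' = x1 then (y1, x1) else (y0', x0')
      (if n.1 ≠ y0 ∧ n.2 ≠ x0 then [(y0, n.2), (n.1, x0)] else []) ++
        n :: pvFusedX fuel y0' x0' y1 x1 sy sx dy dx err'
    else []

-- B's fused y-driving loop
def pvFusedY : Nat → Int → Int → Int → Int → Int → Int → Int → Int → Int → List (Int × Int)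
  | 0, _, _, _, _, _, _, _, _, _ => []
  | fuel + 1, y0, x0, y1, x1, sy, sx, dy, dx, err =>
    if y0 ≠ y1 then
      let err2 := err - dx
      let x0' := if err2 < 0 then x0 + sx else x0
      let err' := if err2 < 0 then err2 + dy else err2
      let y0' := y0 + sy
      let n : Int × Int := if y0' = y1 then (y1, x1) else (y0', x0')
      (if n.1 ≠ y0 ∧ n.2 ≠ x0 then [(y0, n.2), (n.1, x0)] else []) ++
        n :: pvFusedY fuel y0' x0' y1 x1 sy sx dy dx err'
    else []

def rasterize_line_supercover_py_alt (start : Int × Int) (goal : Int × Int) : List (Int × Int) :=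
  let y0 := start.1; let x0 := start.2
  let y1 := goal.1; let x1 := goal.2
  let dy := |y1 - y0|
  let dx := |x1 - x0|
  let sy : Int := if y0 < y1 then 1 else -1
  let sx : Int := if x0 < x1 then 1 else -1
  let out := (y0, x0) ::
    (if dx > dy then
      pvFusedX (x1 - x0).natAbs y0 x0 y1 x1 sy sx dy dx (PySem.Int.floordiv dx 2)
    else
      pvFusedY (y1 - y0).natAbs y0 x0 y1 x1 sy sx dy dx (PySem.Int.floordiv dy 2))
  pvDedup PySem.Set.empty [] out

-- ===== PRECONDITION & SPEC =====
def Spec_rasterize_line_supercover_py (start : Int × Int) (goal : Int × Int) (out : List (Int × Int)) : Prop := out = rasterize_line_supercover_py_alt start goal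
instance (start : Int × Int) (goal : Int × Int) (out : List (Int × Int)) : Decidable (Spec_rasterize_line_supercover_py start goal out) := by unfold Spec_rasterize_line_supercover_py; infer_instance

-- ===== CLAIM (what is proved, stated in full; the proofs are below) =====
def Claim_equal_rasterize_line_supercover_py : Prop := ∀ (start : Int × Int) (goal : Int × Int), Dom_rasterize_line_supercover_py start goal → Spec_rasterize_line_supercover_py start goal (rasterize_line_supercover_py start goal)

-- ===== LEMMAS AND PROOFS =====

-- pvEmit split into "corner cells, then the new point", with the condition in the ≠-form B tests
theorem pvEmit_eq (p q : Int × Int) :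
    pvEmit p q = (if q.1 ≠ p.1 ∧ q.2 ≠ p.2 then [(p.1, q.2), (q.1, p.2)] else []) ++ [q] := by
  unfold pvEmit
  have h1 : (q.1 - p.1 ≠ 0 ∧ q.2 - p.2 ≠ 0) ↔ (q.1 ≠ p.1 ∧ q.2 ≠ p.2) :=
    ⟨fun h => ⟨by omega, by omega⟩, fun h => ⟨by omega, by omega⟩⟩
  split_ifs with ha hb hb <;> simp_all

theorem pvSuperPairs_cons_append (p g : Int × Int) (l : List (Int × Int)) :
    pvSuperPairs (p :: l ++ [g]) = pvEmit p ((l ++ [g]).headD g) ++ pvSuperPairs (l ++ [g]) := by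
  cases l <;> rfl

theorem pvBresX_cons (k : Nat) (y0 x0 y1 x1 sy sx dy dx err : Int) (hx : x0 ≠ x1) :
    pvBresX (k + 1) y0 x0 y1 x1 sy sx dy dx err = (y0, x0) ::
      (if err - dy < 0 then pvBresX k (y0 + sy) (x0 + sx) y1 x1 sy sx dy dx (err - dy + dx)
       else pvBresX k y0 (x0 + sx) y1 x1 sy sx dy dx (err - dy)) := by
  simp only [pvBresX, if_pos hx]

theorem pvBresY_cons (k : Nat) (y0 x0 y1 x1 sy sx dy dx err : Int) (hy : y0 ≠ y1) :
    pvBresY (k + 1) y0 x0 y1 x1 sy sx dy dx err = (y0, x0) ::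
      (if err - dx < 0 then pvBresY k (y0 + sy) (x0 + sx) y1 x1 sy sx dy dx (err - dx + dy)
       else pvBresY k (y0 + sy) x0 y1 x1 sy sx dy dx (err - dx)) := by
  simp only [pvBresY, if_pos hy]

-- fusion lemma, x-driving branch: B's loop equals A's pairwise pass over A's loop output plus the goal point
theorem pvFusedX_eq (y1 x1 sy sx dy dx : Int) (hs : sx = 1 ∨ sx = -1) :
    ∀ (fuel : Nat) (y0 x0 err : Int), x1 - x0 = (fuel : Int) * sx →
      pvFusedX fuel y0 x0 y1 x1 sy sx dy dx err =
        pvSuperPairs (pvBresX fuel y0 x0 y1 x1 sy sx dy dx err ++ [(y1, x1)]) := by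
  intro fuel
  induction fuel with
  | zero =>
    intro y0 x0 err h
    simp [pvFusedX, pvBresX, pvSuperPairs]
  | succ m ih =>
    intro y0 x0 err h
    have hx : x0 ≠ x1 := by
      rcases hs with rfl | rfl <;> (intro he; rw [he] at h; push_cast at h; omega)
    have hinv : x1 - (x0 + sx) = (m : Int) * sx := by
      have hr : ((m : Int) + 1) * sx - sx = (m : Int) * sx := by ring
      push_cast at h; rw [← hr, ← h]; ring
    by_cases herr : err - dy < 0
    · simp only [pvFusedX, pvBresX, if_pos hx, if_pos herr]
      rw [pvSuperPairs_cons_append, ← ih _ _ _ hinv, pvEmit_eq]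
      cases m with
      | zero =>
        have hx1 : x0 + sx = x1 := by
          rcases hs with rfl | rfl <;> (push_cast at hinv; omega)
        simp [pvBresX, hx1]
      | succ k =>
        have hx' : x0 + sx ≠ x1 := by
          rcases hs with rfl | rfl <;> (intro he; rw [he] at hinv; push_cast at hinv; omega)
        rw [pvBresX_cons _ _ _ _ _ _ _ _ _ _ hx']
        simp [hx']
    · simp only [pvFusedX, pvBresX, if_pos hx, if_neg herr]
      rw [pvSuperPairs_cons_append, ← ih _ _ _ hinv, pvEmit_eq]
      cases m with
      | zero =>
        have hx1 : x0 + sx = x1 := by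
          rcases hs with rfl | rfl <;> (push_cast at hinv; omega)
        simp [pvBresX, hx1]
      | succ k =>
        have hx' : x0 + sx ≠ x1 := by
          rcases hs with rfl | rfl <;> (intro he; rw [he] at hinv; push_cast at hinv; omega)
        rw [pvBresX_cons _ _ _ _ _ _ _ _ _ _ hx']
        simp [hx']

-- fusion lemma, y-driving branch (mirror image)
theorem pvFusedY_eq (y1 x1 sy sx dy dx : Int) (hs : sy = 1 ∨ sy = -1) :
    ∀ (fuel : Nat) (y0 x0 err : Int), y1 - y0 = (fuel : Int) * sy →
      pvFusedY fuel y0 x0 y1 x1 sy sx dy dx err =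
        pvSuperPairs (pvBresY fuel y0 x0 y1 x1 sy sx dy dx err ++ [(y1, x1)]) := by
  intro fuel
  induction fuel with
  | zero =>
    intro y0 x0 err h
    simp [pvFusedY, pvBresY, pvSuperPairs]
  | succ m ih =>
    intro y0 x0 err h
    have hy : y0 ≠ y1 := by
      rcases hs with rfl | rfl <;> (intro he; rw [he] at h; push_cast at h; omega)
    have hinv : y1 - (y0 + sy) = (m : Int) * sy := by
      have hr : ((m : Int) + 1) * sy - sy = (m : Int) * sy := by ring
      push_cast at h; rw [← hr, ← h]; ring
    by_cases herr : err - dx < 0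
    · simp only [pvFusedY, pvBresY, if_pos hy, if_pos herr]
      rw [pvSuperPairs_cons_append, ← ih _ _ _ hinv, pvEmit_eq]
      cases m with
      | zero =>
        have hy1 : y0 + sy = y1 := by
          rcases hs with rfl | rfl <;> (push_cast at hinv; omega)
        simp [pvBresY, hy1]
      | succ k =>
        have hy' : y0 + sy ≠ y1 := by
          rcases hs with rfl | rfl <;> (intro he; rw [he] at hinv; push_cast at hinv; omega)
        rw [pvBresY_cons _ _ _ _ _ _ _ _ _ _ hy']
        simp [hy']
    · simp only [pvFusedY, pvBresY, if_pos hy, if_neg herr]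
      rw [pvSuperPairs_cons_append, ← ih _ _ _ hinv, pvEmit_eq]
      cases m with
      | zero =>
        have hy1 : y0 + sy = y1 := by
          rcases hs with rfl | rfl <;> (push_cast at hinv; omega)
        simp [pvBresY, hy1]
      | succ k =>
        have hy' : y0 + sy ≠ y1 := by
          rcases hs with rfl | rfl <;> (intro he; rw [he] at hinv; push_cast at hinv; omega)
        rw [pvBresY_cons _ _ _ _ _ _ _ _ _ _ hy']
        simp [hy']

-- ===== VERDICT (by name: the statement is the Claim_ definition above) =====
theorem rasterize_line_supercover_py_spec : Claim_equal_rasterize_line_supercover_py := by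
  intro start goal _
  obtain ⟨y0, x0⟩ := start
  obtain ⟨y1, x1⟩ := goal
  unfold Spec_rasterize_line_supercover_py rasterize_line_supercover_py
    rasterize_line_supercover_py_alt pvRasterizeLine
  dsimp only
  by_cases hbr : |x1 - x0| > |y1 - y0|
  · have hx : x0 ≠ x1 := by
      intro he
      rw [he, sub_self, abs_zero] at hbr
      have := abs_nonneg (y1 - y0)
      omega
    have hs : (if x0 < x1 then (1 : Int) else -1) = 1 ∨ (if x0 < x1 then (1 : Int) else -1) = -1 := by
      split_ifs <;> simp
    have hfx : x1 - x0 = (((x1 - x0).natAbs : Nat) : Int) * (if x0 < x1 then (1 : Int) else -1) := by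
      rw [Int.natCast_natAbs]
      split_ifs with h
      · rw [abs_of_pos (by omega)]; ring
      · rw [abs_of_nonpos (by omega)]; ring
    obtain ⟨f, hf⟩ : ∃ f, (x1 - x0).natAbs = f + 1 := ⟨(x1 - x0).natAbs - 1, by omega⟩
    have hfe := pvFusedX_eq y1 x1 (if y0 < y1 then (1 : Int) else -1)
      (if x0 < x1 then (1 : Int) else -1) |y1 - y0| |x1 - x0| hs
      ((x1 - x0).natAbs) y0 x0 (PySem.Int.floordiv |x1 - x0| 2) hfx
    rw [if_pos hbr, if_pos hbr, hfe, hf, pvBresX_cons _ _ _ _ _ _ _ _ _ _ hx]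
    simp
  · by_cases hy : y0 = y1
    · have hx0 : x0 = x1 := by
        subst hy
        rw [sub_self, abs_zero] at hbr
        have h1 := abs_nonneg (x1 - x0)
        have h2 : |x1 - x0| = 0 := by omega
        have := abs_eq_zero.mp h2
        omega
      subst hy; subst hx0
      simp [pvBresY, pvFusedY, pvDedup, PySem.Set.contains, PySem.Set.add,
        PySem.Set.empty]
    · have hs : (if y0 < y1 then (1 : Int) else -1) = 1 ∨ (if y0 < y1 then (1 : Int) else -1) = -1 := by
        split_ifs <;> simp
      have hfy : y1 - y0 = (((y1 - y0).natAbs : Nat) : Int) * (if y0 < y1 then (1 : Int) else -1) := by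
        rw [Int.natCast_natAbs]
        split_ifs with h
        · rw [abs_of_pos (by omega)]; ring
        · rw [abs_of_nonpos (by omega)]; ring
      obtain ⟨f, hf⟩ : ∃ f, (y1 - y0).natAbs = f + 1 := by
        have : y1 - y0 ≠ 0 := by omega
        exact ⟨(y1 - y0).natAbs - 1, by omega⟩
      have hfe := pvFusedY_eq y1 x1 (if y0 < y1 then (1 : Int) else -1)
        (if x0 < x1 then (1 : Int) else -1) |y1 - y0| |x1 - x0| hs
        ((y1 - y0).natAbs) y0 x0 (PySem.Int.floordiv |y1 - y0| 2) hfy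
      rw [if_neg hbr, if_neg hbr, hfe, hf, pvBresY_cons _ _ _ _ _ _ _ _ _ _ hy]
      simp
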